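-- pv_equiv track=rewrite | github.com/minivess-mlops/minivess-mlops | scripts/setup_github_project.py | determine_size
-- ===== SOURCE A (Python) =====
-- SIZE_S = "b277fb01"
--
-- SIZE_M = "86db8eb3"
--
-- SIZE_L = "853c8207"
--
-- def determine_size(labels: list[str], title: str) -> tuple[str, int]:
--     """Determine size and estimate from labels/title."""
--     label_names = {l if isinstance(l, str) else l.get("name", "") for l in labels}
--     if "bug" in label_names:
--         return SIZE_S, 2
--     if "refactor" in label_names or "tech-debt" in label_names:
--         return SIZE_S, 2
--     if "science" in label_names or "research" in label_names:
--         return SIZE_L, 5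
--     if "infrastructure" in label_names:
--         return SIZE_M, 3
--     if "enhancement" in label_names:
--         return SIZE_M, 3
--     return SIZE_S, 2
-- ===== SOURCE B (Python) =====
-- SIZE_S = "b277fb01"
-- SIZE_M = "86db8eb3"
-- SIZE_L = "853c8207"
--
-- # Each trigger label carries a priority rank; the lowest rank present wins.
-- _PRIORITY = {
--     "bug": 0,
--     "refactor": 1,
--     "tech-debt": 1,
--     "science": 2,
--     "research": 2,
--     "infrastructure": 3,
--     "enhancement": 4,
-- }
-- _RESULT = {0: (SIZE_S, 2), 1: (SIZE_S, 2), 2: (SIZE_L, 5), 3: (SIZE_M, 3), 4: (SIZE_M, 3)}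
--
-- def determine_size(labels: list[str], title: str) -> tuple[str, int]:
--     """Determine size and estimate from labels/title."""
--     label_names = {l if isinstance(l, str) else l.get("name", "") for l in labels}
--     best = min((_PRIORITY.get(n, 5) for n in label_names), default=5)
--     return _RESULT.get(best, (SIZE_S, 2))
-- ===== Notes on version B (the rewrite author's own statement) =====
-- stated objective: alternative
-- what changed: Instead of testing trigger labels one by one in priority order, B makes one pass over the labels computing the minimum priority rank assigned by a label-to-rank dict, then maps that rank to its result.
import Mathlib
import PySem

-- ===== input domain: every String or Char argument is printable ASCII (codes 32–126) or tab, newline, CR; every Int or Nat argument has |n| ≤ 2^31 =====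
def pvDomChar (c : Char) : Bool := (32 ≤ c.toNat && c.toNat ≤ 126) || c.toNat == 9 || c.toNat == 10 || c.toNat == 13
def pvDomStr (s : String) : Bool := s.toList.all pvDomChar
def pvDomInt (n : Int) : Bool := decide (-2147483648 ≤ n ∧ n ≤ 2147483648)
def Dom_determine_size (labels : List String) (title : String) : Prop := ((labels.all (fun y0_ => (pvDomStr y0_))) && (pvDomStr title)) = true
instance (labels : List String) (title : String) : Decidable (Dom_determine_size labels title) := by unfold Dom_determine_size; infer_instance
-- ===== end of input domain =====

-- B replaces A's if/return chain by one pass computing the minimum priority rank of the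
-- labels via a label→rank dict, then a rank→result lookup (objective: alternative).

-- ===== PORT A =====
def pySIZE_S : String := "b277fb01"
def pySIZE_M : String := "86db8eb3"
def pySIZE_L : String := "853c8207"

def determine_size (labels : List String) (title : String) : String × Int :=
  let label_names : PySem.Set String := PySem.Set.ofList labels
  if PySem.Set.contains label_names "bug" then (pySIZE_S, 2)
  else if PySem.Set.contains label_names "refactor" || PySem.Set.contains label_names "tech-debt" then (pySIZE_S, 2)
  else if PySem.Set.contains label_names "science" || PySem.Set.contains label_names "research" then (pySIZE_L, 5)
  else if PySem.Set.contains label_names "infrastructure" then (pySIZE_M, 3)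
  else if PySem.Set.contains label_names "enhancement" then (pySIZE_M, 3)
  else (pySIZE_S, 2)

-- ===== PORT B =====
def pyPRIORITY : PySem.Dict String Int :=
  PySem.Dict.ofList
    [("bug", 0), ("refactor", 1), ("tech-debt", 1), ("science", 2), ("research", 2),
     ("infrastructure", 3), ("enhancement", 4)]

def pyRESULT : PySem.Dict Int (String × Int) :=
  PySem.Dict.ofList
    [(0, (pySIZE_S, 2)), (1, (pySIZE_S, 2)), (2, (pySIZE_L, 5)), (3, (pySIZE_M, 3)), (4, (pySIZE_M, 3))]

-- min(gen, default=5) is ported as a fold of min starting at the default (exact here: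
-- every rank the generator yields is ≤ 5, and min over a set ignores iteration order).
def determine_size_alt (labels : List String) (title : String) : String × Int :=
  let label_names : PySem.Set String := PySem.Set.ofList labels
  let best : Int := label_names.foldl (fun acc n => min acc (PySem.Dict.getD pyPRIORITY n 5)) 5
  PySem.Dict.getD pyRESULT best (pySIZE_S, 2)

-- ===== PRECONDITION & SPEC =====
def Spec_determine_size (labels : List String) (title : String) (out : String × Int) : Prop := out = determine_size_alt labels title
instance (labels : List String) (title : String) (out : String × Int) : Decidable (Spec_determine_size labels title out) := by unfold Spec_determine_size; infer_instance

-- ===== CLAIM =====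
def Claim_equal_determine_size : Prop := ∀ (labels : List String) (title : String), Dom_determine_size labels title → Spec_determine_size labels title (determine_size labels title)

-- ===== LEMMAS AND PROOFS =====

-- closed form of the minimum rank over a list of names
def minRankOf (l : List String) : Int :=
  if "bug" ∈ l then 0
  else if "refactor" ∈ l then 1 else if "tech-debt" ∈ l then 1
  else if "science" ∈ l then 2 else if "research" ∈ l then 2
  else if "infrastructure" ∈ l then 3
  else if "enhancement" ∈ l then 4
  else 5

lemma getD_pyPRIORITY (x : String) : PySem.Dict.getD pyPRIORITY x 5 =
    (if x = "bug" then 0 else if x = "refactor" then 1 else if x = "tech-debt" then 1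
     else if x = "science" then 2 else if x = "research" then 2
     else if x = "infrastructure" then 3 else if x = "enhancement" then 4 else 5) := by
  have hit : pyPRIORITY.items = [("bug", 0), ("refactor", 1), ("tech-debt", 1), ("science", 2),
      ("research", 2), ("infrastructure", 3), ("enhancement", 4)] := by decide
  rcases eq_or_ne x "bug" with h1 | h1; · subst h1; decide
  rcases eq_or_ne x "refactor" with h2 | h2; · subst h2; decide
  rcases eq_or_ne x "tech-debt" with h3 | h3; · subst h3; decide
  rcases eq_or_ne x "science" with h4 | h4; · subst h4; decide
  rcases eq_or_ne x "research" with h5 | h5; · subst h5; decide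
  rcases eq_or_ne x "infrastructure" with h6 | h6; · subst h6; decide
  rcases eq_or_ne x "enhancement" with h7 | h7; · subst h7; decide
  have b1 : ("bug" == x) = false := beq_eq_false_iff_ne.mpr (Ne.symm h1)
  have b2 : ("refactor" == x) = false := beq_eq_false_iff_ne.mpr (Ne.symm h2)
  have b3 : ("tech-debt" == x) = false := beq_eq_false_iff_ne.mpr (Ne.symm h3)
  have b4 : ("science" == x) = false := beq_eq_false_iff_ne.mpr (Ne.symm h4)
  have b5 : ("research" == x) = false := beq_eq_false_iff_ne.mpr (Ne.symm h5)
  have b6 : ("infrastructure" == x) = false := beq_eq_false_iff_ne.mpr (Ne.symm h6)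
  have b7 : ("enhancement" == x) = false := beq_eq_false_iff_ne.mpr (Ne.symm h7)
  simp [PySem.Dict.getD, PySem.Dict.get?, hit, List.find?, b1, b2, b3, b4, b5, b6, b7,
    h1, h2, h3, h4, h5, h6, h7]

lemma foldl_min_eq (l : List String) : ∀ acc : Int, acc ≤ 5 →
    l.foldl (fun acc n => min acc (PySem.Dict.getD pyPRIORITY n 5)) acc = min acc (minRankOf l) := by
  induction l with
  | nil => intro acc h; simp [minRankOf]; omega
  | cons x xs ih =>
    intro acc h
    have hx : PySem.Dict.getD pyPRIORITY x 5 ≤ 5 := by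
      rw [getD_pyPRIORITY]; split_ifs <;> omega
    rw [List.foldl_cons, ih _ (by omega), getD_pyPRIORITY]
    unfold minRankOf
    simp only [List.mem_cons]
    rcases eq_or_ne x "bug" with h1 | h1
    · subst h1; simp; split_ifs <;> omega
    rcases eq_or_ne x "refactor" with h2 | h2
    · subst h2; simp; split_ifs <;> omega
    rcases eq_or_ne x "tech-debt" with h3 | h3
    · subst h3; simp; split_ifs <;> omega
    rcases eq_or_ne x "science" with h4 | h4
    · subst h4; simp; split_ifs <;> omega
    rcases eq_or_ne x "research" with h5 | h5
    · subst h5; simp; split_ifs <;> omega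
    rcases eq_or_ne x "infrastructure" with h6 | h6
    · subst h6; simp; split_ifs <;> omega
    rcases eq_or_ne x "enhancement" with h7 | h7
    · subst h7; simp; split_ifs <;> omega
    simp [h1, h2, h3, h4, h5, h6, h7, Ne.symm h1, Ne.symm h2, Ne.symm h3, Ne.symm h4, Ne.symm h5, Ne.symm h6, Ne.symm h7]
    split_ifs <;> omega

-- ===== VERDICT =====
theorem determine_size_spec : Claim_equal_determine_size := by
  intro labels title _
  unfold Spec_determine_size determine_size determine_size_alt
  dsimp only
  rw [foldl_min_eq (PySem.Set.ofList labels) 5 (le_refl 5)]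
  have hmin : min (5 : Int) (minRankOf (PySem.Set.ofList labels)) = minRankOf (PySem.Set.ofList labels) := by
    unfold minRankOf; split_ifs <;> omega
  rw [hmin]
  unfold minRankOf
  simp only [← PySem.Set.contains_iff]
  split_ifs <;> simp_all <;> decide
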